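-- pv_equiv track=rewrite | github.com/Spenstine/pythonPractice | motherChildpuzzle.py | occurance
-- ===== SOURCE A (Python) =====
-- def reverse_int(x):
--     """
--     x: any value
--     output: reverse of x
--     """
--     y = int(str(x).zfill(2)[::-1])
--     return y
--
-- def occurance(max_num):
--     """
--     max_num: max number of occurance of reverse ages
--     output: first time when reverse occured
--     """
--     for i in range(1, 10):
--         counter = 0
--         #addition is by 11 to ensure reverse holds
--         addition = 11
--         x = i
--         y = reverse_int(x)
--         while x < 99:
--             if x == reverse_int(y):
--                 counter += 1
--             x += addition
--             y += addition
--         if counter == max_num: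
--             return i
-- ===== SOURCE B (Python) =====
-- def occurance(max_num):
--     # simpler: for starting digit i, A's counter is exactly 10 - i
--     # (x runs over i, i+11, ..., which are the 10-i two-digit-or-less
--     # palindromic-pair values 11*k+... matching their reverse), so the
--     # first i in 1..9 with 10 - i == max_num is the answer.
--     for i in range(1, 10):
--         if 10 - i == max_num:
--             return i
-- ===== Notes on version B (the rewrite author's own statement) =====
-- stated objective: simpler
-- what changed: B drops reverse_int and the inner +11 counting walk entirely, using the closed-form fact that A's counter for starting digit i is exactly 10 - i; it just returns the first digit i whose closed-form counter equals max_num.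
import Mathlib
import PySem

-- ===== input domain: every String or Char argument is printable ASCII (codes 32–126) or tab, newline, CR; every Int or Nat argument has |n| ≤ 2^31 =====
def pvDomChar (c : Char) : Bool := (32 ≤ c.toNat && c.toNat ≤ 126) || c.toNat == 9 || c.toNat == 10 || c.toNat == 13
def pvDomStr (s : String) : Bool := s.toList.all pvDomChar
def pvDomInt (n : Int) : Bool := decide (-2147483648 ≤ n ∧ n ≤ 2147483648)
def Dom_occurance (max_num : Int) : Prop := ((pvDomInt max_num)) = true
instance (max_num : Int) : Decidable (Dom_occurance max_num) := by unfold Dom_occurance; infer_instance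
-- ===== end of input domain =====

-- B replaces A's inner reverse-and-count walk by the closed form counter = 10 - i (simpler).


-- ===== PORT A =====
-- reverse_int: int(str(x).zfill(2)[::-1]); the .getD 0 marks int()'s ValueError branch,
-- which is unreachable for the nonnegative arguments occurance passes in.
def pvReverseInt (x : Int) : Int :=
  (PySem.Int.ofChars? ((PySem.Chars.zfill (PySem.Int.toChars x) 2).reverse)).getD 0

-- the 'while x < 99' loop, counting matches; state (x, y, counter)
-- fuel is only a totality bound: x starts in 1..9 and grows by 11, so ≤ 9 iterations occur
def pvWhileA (fuel : Nat) (x y counter : Int) : Int :=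
  match fuel with
  | 0 => counter
  | fuel + 1 =>
    if x < 99 then
      pvWhileA fuel (x + 11) (y + 11) (if x = pvReverseInt y then counter + 1 else counter)
    else counter

-- the 'for i in range(1, 10)' loop with early return
def pvForA (is : List Int) (max_num : Int) : Option Int :=
  match is with
  | [] => none
  | i :: rest =>
      let counter := pvWhileA 9 i (pvReverseInt i) 0
      if counter = max_num then some i else pvForA rest max_num

def occurance (max_num : Int) : Option Int :=
  pvForA (PySem.List.pyRange 1 10 1) max_num

-- ===== PORT B =====
def pvForB (is : List Int) (max_num : Int) : Option Int :=
  match is with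
  | [] => none
  | i :: rest => if 10 - i = max_num then some i else pvForB rest max_num

def occurance_alt (max_num : Int) : Option Int :=
  pvForB (PySem.List.pyRange 1 10 1) max_num

-- ===== PRECONDITION & SPEC =====
def Spec_occurance (max_num : Int) (out : Option Int) : Prop := out = occurance_alt max_num
instance (max_num : Int) (out : Option Int) : Decidable (Spec_occurance max_num out) := by unfold Spec_occurance; infer_instance

-- ===== CLAIM (what is proved, stated in full; the proofs are below) =====
def Claim_equal_occurance : Prop := ∀ (max_num : Int), Dom_occurance max_num → Spec_occurance max_num (occurance max_num)

-- ===== LEMMAS AND PROOFS =====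
theorem pvRange_eval : PySem.List.pyRange 1 10 1 = [1, 2, 3, 4, 5, 6, 7, 8, 9] := by decide

theorem pvCounter_eval (i : Int) (h : i ∈ PySem.List.pyRange 1 10 1) :
    pvWhileA 9 i (pvReverseInt i) 0 = 10 - i := by
  rw [pvRange_eval] at h
  fin_cases h <;> decide

theorem occurance_eq (max_num : Int) : occurance max_num = occurance_alt max_num := by
  unfold occurance occurance_alt
  rw [pvRange_eval]
  simp only [pvForA, pvForB,
    pvCounter_eval 1 (by decide), pvCounter_eval 2 (by decide), pvCounter_eval 3 (by decide),
    pvCounter_eval 4 (by decide), pvCounter_eval 5 (by decide), pvCounter_eval 6 (by decide),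
    pvCounter_eval 7 (by decide), pvCounter_eval 8 (by decide), pvCounter_eval 9 (by decide)]

-- ===== VERDICT (by name: the statement is the Claim_ definition above) =====
theorem occurance_spec : Claim_equal_occurance := by
  intro m _
  unfold Spec_occurance
  exact occurance_eq m
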